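-- pv_equiv track=rewrite | github.com/Terryjuwah/Python-Projects | student_gradebook.py | get_best_worst
-- ===== SOURCE A (Python) =====
-- def get_best_worst(courses, scores):
--
--     best_course = courses[0]
--     best_score = scores[0]
--     worst_course = courses[0]
--     worst_score = scores[0]
--
--     for i in range(1, len(scores)):
--         if scores[i] > best_score:
--             best_score = scores[i]
--             best_course = courses[i]
--
--         if scores[i] < worst_score:
--             worst_score = scores[i]
--             worst_course = courses[i]
--
--     return best_course, best_score, worst_course, worst_score
-- ===== SOURCE B (Python) =====
-- def get_best_worst(courses, scores):
--     best_i = max(range(len(scores)), key=lambda i: scores[i])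
--     worst_i = min(range(len(scores)), key=lambda i: scores[i])
--     return courses[best_i], scores[best_i], courses[worst_i], scores[worst_i]
-- ===== Notes on version B (the rewrite author's own statement) =====
-- stated objective: idiomatic
-- what changed: A's single loop threading four accumulator variables is replaced by two built-in index scans, max/min over range(len(scores)) keyed on scores[i] (first extremum kept, like A), followed by direct indexing.
-- outside the precondition, e.g. on get_best_worst(['a'], [5, 5]): A returns ('a', 5, 'a', 5), B returns ('a', 5, 'a', 5)
import Mathlib
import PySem

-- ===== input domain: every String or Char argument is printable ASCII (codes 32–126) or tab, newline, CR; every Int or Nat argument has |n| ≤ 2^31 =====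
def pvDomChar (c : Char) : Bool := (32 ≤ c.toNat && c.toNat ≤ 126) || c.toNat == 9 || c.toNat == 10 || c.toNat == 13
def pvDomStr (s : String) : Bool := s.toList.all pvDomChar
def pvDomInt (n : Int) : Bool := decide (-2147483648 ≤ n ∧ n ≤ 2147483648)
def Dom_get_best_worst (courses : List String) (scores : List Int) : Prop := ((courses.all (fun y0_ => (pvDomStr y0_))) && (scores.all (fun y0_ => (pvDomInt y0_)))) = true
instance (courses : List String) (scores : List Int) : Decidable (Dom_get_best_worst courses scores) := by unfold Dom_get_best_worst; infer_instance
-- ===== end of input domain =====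

-- B replaces A's single four-accumulator loop by two idiomatic argmax/argmin index scans (max/min keyed on scores[i]); same cost, plainer code.


-- ===== PORT A =====
-- literal port of A: initialise all four accumulators from index 0, then one pass over range(1, len(scores));
-- stepA is the body of A's for-loop (the two independent ifs, in order)
def stepA (courses : List String) (scores : List Int) (st : String × Int × String × Int) (i : Int) : String × Int × String × Int :=
  let (bc, bs, wc, ws) := st
  let (bc, bs) := if PySem.List.pyGetD scores i 0 > bs
    then (PySem.List.pyGetD courses i "", PySem.List.pyGetD scores i 0) else (bc, bs)
  let (wc, ws) := if PySem.List.pyGetD scores i 0 < ws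
    then (PySem.List.pyGetD courses i "", PySem.List.pyGetD scores i 0) else (wc, ws)
  (bc, bs, wc, ws)

def get_best_worst (courses : List String) (scores : List Int) : String × Int × String × Int :=
  let best_course := PySem.List.pyGetD courses 0 ""
  let best_score := PySem.List.pyGetD scores 0 0
  let worst_course := PySem.List.pyGetD courses 0 ""
  let worst_score := PySem.List.pyGetD scores 0 0
  (PySem.List.pyRange 1 (scores.length : Int) 1).foldl (stepA courses scores)
    (best_course, best_score, worst_course, worst_score)

-- ===== PORT B =====
-- Python max(iterable, key): first element, then keep the incumbent unless the key is STRICTLY greater (first maximum wins)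
def pyArgBest (key : Int → Int) (l : List Int) : Int :=
  match l with
  | [] => 0   -- Python max raises ValueError on an empty range; excluded by Pre_
  | j :: rest => rest.foldl (fun b i => if key i > key b then i else b) j

def pyArgWorst (key : Int → Int) (l : List Int) : Int :=
  match l with
  | [] => 0   -- Python min raises ValueError on an empty range; excluded by Pre_
  | j :: rest => rest.foldl (fun w i => if key i < key w then i else w) j

def get_best_worst_alt (courses : List String) (scores : List Int) : String × Int × String × Int :=
  let idxs := PySem.List.pyRange 0 (scores.length : Int) 1
  let best_i := pyArgBest (fun i => PySem.List.pyGetD scores i 0) idxs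
  let worst_i := pyArgWorst (fun i => PySem.List.pyGetD scores i 0) idxs
  (PySem.List.pyGetD courses best_i "", PySem.List.pyGetD scores best_i 0,
   PySem.List.pyGetD courses worst_i "", PySem.List.pyGetD scores worst_i 0)

-- ===== PRECONDITION & SPEC =====
-- Pre_ requires scores nonempty and courses at least as long as scores, so every index either program uses is valid;
-- on shorter courses A usually raises IndexError (as does B), though on some such inputs both still return (the same value) —
-- e.g. (['a'], [5, 5]): A returns ('a', 5, 'a', 5) and B returns the same (see claim cites).
def Pre_get_best_worst (courses : List String) (scores : List Int) : Prop :=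
  scores ≠ [] ∧ scores.length ≤ courses.length
instance (courses : List String) (scores : List Int) : Decidable (Pre_get_best_worst courses scores) := by unfold Pre_get_best_worst; infer_instance
def pvWitness_get_best_worst : List String × List Int := (["math", "art"], [70, 95])
def Spec_get_best_worst (courses : List String) (scores : List Int) (out : String × Int × String × Int) : Prop := out = get_best_worst_alt courses scores
instance (courses : List String) (scores : List Int) (out : String × Int × String × Int) : Decidable (Spec_get_best_worst courses scores out) := by unfold Spec_get_best_worst; infer_instance

-- ===== CLAIM (what is proved, stated in full; the proofs are below) =====
def Claim_equal_get_best_worst : Prop := ∀ (courses : List String) (scores : List Int), Dom_get_best_worst courses scores → Pre_get_best_worst courses scores → Spec_get_best_worst courses scores (get_best_worst courses scores)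

-- ===== LEMMAS AND PROOFS =====

-- A's combined fold over any index list, started from the state of index pair (b, w), computes
-- exactly B's argmax/argmin folds and then reads courses/scores at the resulting indices.
theorem foldA_eq_args (courses : List String) (scores : List Int) (l : List Int) (b w : Int) :
    l.foldl (stepA courses scores)
      (PySem.List.pyGetD courses b "", PySem.List.pyGetD scores b 0,
       PySem.List.pyGetD courses w "", PySem.List.pyGetD scores w 0)
    = (PySem.List.pyGetD courses (l.foldl (fun b i => if PySem.List.pyGetD scores i 0 > PySem.List.pyGetD scores b 0 then i else b) b) "",
       PySem.List.pyGetD scores (l.foldl (fun b i => if PySem.List.pyGetD scores i 0 > PySem.List.pyGetD scores b 0 then i else b) b) 0,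
       PySem.List.pyGetD courses (l.foldl (fun w i => if PySem.List.pyGetD scores i 0 < PySem.List.pyGetD scores w 0 then i else w) w) "",
       PySem.List.pyGetD scores (l.foldl (fun w i => if PySem.List.pyGetD scores i 0 < PySem.List.pyGetD scores w 0 then i else w) w) 0) := by
  induction l generalizing b w with
  | nil => rfl
  | cons i l ih =>
    simp only [List.foldl_cons, stepA]
    by_cases hb : PySem.List.pyGetD scores i 0 > PySem.List.pyGetD scores b 0 <;>
      by_cases hw : PySem.List.pyGetD scores i 0 < PySem.List.pyGetD scores w 0 <;>
      simp only [hb, hw, if_true, if_false] <;>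
      exact ih _ _

theorem get_best_worst_spec : Claim_equal_get_best_worst := by
  intro courses scores _hdom hpre
  obtain ⟨hne, _hlen⟩ := hpre
  unfold Spec_get_best_worst get_best_worst get_best_worst_alt pyArgBest pyArgWorst
  have hn : (0 : Int) < (scores.length : Int) := by
    have h0 : 0 < scores.length := List.length_pos_of_ne_nil hne
    exact_mod_cast h0
  rw [show PySem.List.pyRange 0 (scores.length : Int) 1
        = 0 :: PySem.List.pyRange (0 + 1) (scores.length : Int) 1
      from PySem.List.pyRange_one_cons hn]
  simp only [zero_add]
  exact foldA_eq_args courses scores _ 0 0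

-- ===== VERDICT (by name: the statement is the Claim_ definition above) =====
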